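-- pv_equiv track=rewrite | github.com/Bufitta/algorithms | lesson_5/task_2.py | get_hex_sum
-- ===== SOURCE A (Python) =====
-- from collections import deque
--
-- hexs = {
--     '0': 0, '1': 1, '2': 2, '3': 3, '4': 4, '5': 5, '6': 6, '7': 7, '8': 8, '9': 9,
--     'A': 10, 'B': 11, 'C': 12, 'D': 13, 'E': 14, 'F': 15
-- }
--
-- def get_hex_sum(arrays):
--     hex_sum = deque()
--     in_mem = 0
--     max_array = max(arrays, key=len)
--     for i in range(len(max_array)):
--         sum_ = in_mem
--         for array in arrays:
--             if len(array) > i: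
--                 sum_ += array[i]
--         if sum_ >= 16:
--             hex_sum.appendleft(sum_ % 16)
--             in_mem = sum_ // 16
--         else:
--             hex_sum.appendleft(sum_)
--             in_mem = 0
--
--     for idx, num in enumerate(hex_sum):
--         for key, value in hexs.items():
--             if num == value:
--                 hex_sum[idx] = key
--
--     return list(hex_sum)
-- ===== SOURCE B (Python) =====
-- def get_hex_sum(arrays):
--     length = len(max(arrays, key=len))
--     total = 0
--     for array in arrays:
--         for i, d in enumerate(array):
--             total += d * 16 ** i
--     digits = []
--     for _ in range(length):
--         digits.append('0123456789ABCDEF'[total % 16])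
--         total //= 16
--     digits.reverse()
--     return digits
-- ===== Notes on version B (the rewrite author's own statement) =====
-- stated objective: simpler
-- what changed: Replaces the interleaved per-column/per-array carry loop plus the per-digit scan of the hexs dict by accumulating one integer total = sum of d*16^i over all arrays and then extracting exactly L base-16 digits of it, indexing '0123456789ABCDEF' directly; Pre_ excludes the empty list (ValueError) and inputs whose weighted prefix column sums go negative, where A leaves raw ints (not strings) in the result.
-- outside the precondition, e.g. on get_hex_sum([[-1]]): A returns [-1], B returns ['F']
import Mathlib
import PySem

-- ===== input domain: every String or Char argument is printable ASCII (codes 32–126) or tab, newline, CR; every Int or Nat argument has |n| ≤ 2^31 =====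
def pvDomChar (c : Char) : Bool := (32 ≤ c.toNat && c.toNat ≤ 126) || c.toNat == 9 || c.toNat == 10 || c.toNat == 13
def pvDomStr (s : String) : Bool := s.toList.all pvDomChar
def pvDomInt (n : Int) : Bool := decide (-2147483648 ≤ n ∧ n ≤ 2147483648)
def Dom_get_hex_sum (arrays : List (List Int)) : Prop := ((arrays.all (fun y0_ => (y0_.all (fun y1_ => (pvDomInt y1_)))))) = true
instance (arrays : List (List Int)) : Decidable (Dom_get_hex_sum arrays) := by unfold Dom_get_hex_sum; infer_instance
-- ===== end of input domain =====

-- B replaces A's per-column/per-array carry loop and per-digit dict scan by one integer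
-- accumulation (total = Σ d·16^i) followed by a single base-16 digit extraction (objective: simpler).

-- ===== PORT A =====
-- the module-level `hexs` dict, as the (key, value) pairs A's inner loop iterates over
def pvHexPairs : List (String × Int) :=
  [("0", 0), ("1", 1), ("2", 2), ("3", 3), ("4", 4), ("5", 5), ("6", 6), ("7", 7),
   ("8", 8), ("9", 9), ("A", 10), ("B", 11), ("C", 12), ("D", 13), ("E", 14), ("F", 15)]

def get_hex_sum (arrays : List (List Int)) : List String :=
  match PySem.List.max? arrays (fun a => (a.length : Int)) with
  | none => []  -- Python raises ValueError on empty input; excluded by Pre_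
  | some max_array =>
    let st := (PySem.List.pyRange 0 (max_array.length : Int) 1).foldl
      (fun (st : List Int × Int) i =>
        let sum_ := arrays.foldl
          (fun s array =>
            if (array.length : Int) > i then s + (PySem.List.pyGet? array i).getD 0 else s)
          st.2
        if sum_ ≥ 16 then (PySem.Int.mod sum_ 16 :: st.1, PySem.Int.floordiv sum_ 16)
        else (sum_ :: st.1, 0))
      ([], 0)
    -- Python rewrites each digit to its key in `hexs`; a digit with no key stays an int
    -- (not a str — those inputs are excluded by Pre_); "" stands for that here
    st.1.map (fun num =>
      (pvHexPairs.foldl (fun cur kv => if num == kv.2 then some kv.1 else cur) none).getD "")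

-- ===== PORT B =====
def pvHexStr : String := "0123456789ABCDEF"

def get_hex_sum_alt (arrays : List (List Int)) : List String :=
  match PySem.List.max? arrays (fun a => (a.length : Int)) with
  | none => []  -- Python raises ValueError on empty input; excluded by Pre_
  | some m =>
    let total := arrays.foldl
      (fun t array => (PySem.List.enumerate array 0).foldl
        (fun t p => t + p.2 * 16 ^ p.1.toNat) t) 0
    let fin := (PySem.List.pyRange 0 (m.length : Int) 1).foldl
      (fun (st : List String × Int) _ =>
        (st.1 ++ [((PySem.Str.pyGet? pvHexStr (PySem.Int.mod st.2 16)).map (fun c => String.ofList [c])).getD ""],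
         PySem.Int.floordiv st.2 16))
      ([], total)
    fin.1.reverse

-- ===== PRECONDITION & SPEC =====
-- sum of column j over all arrays (missing entries count 0), and the value of the first n columns
def pvColSum (arrays : List (List Int)) (j : Nat) : Int :=
  (arrays.map (fun a => a.getD j 0)).sum
def pvPrefVal (arrays : List (List Int)) (n : Nat) : Int :=
  ((List.range n).map (fun j => pvColSum arrays j * 16 ^ j)).sum

-- Pre_ excludes the empty list (A raises ValueError) and inputs whose weighted prefix column
-- sums Σ_{j<n} colsum(j)·16^j go negative: exactly there A's carry loop leaves a raw negative
-- int (not a hex string) in the returned list, so A's result is not a value of type list[str].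
def Pre_get_hex_sum (arrays : List (List Int)) : Prop :=
  arrays ≠ [] ∧
  ∀ n : Nat, n ≤ (arrays.map List.length).foldl max 0 → 0 ≤ pvPrefVal arrays n
instance (arrays : List (List Int)) : Decidable (Pre_get_hex_sum arrays) := by
  unfold Pre_get_hex_sum; infer_instance

def pvWitness_get_hex_sum : List (List Int) := [[10, 15, 1], [5, 2]]

def Spec_get_hex_sum (arrays : List (List Int)) (out : List String) : Prop := out = get_hex_sum_alt arrays
instance (arrays : List (List Int)) (out : List String) : Decidable (Spec_get_hex_sum arrays out) := by unfold Spec_get_hex_sum; infer_instance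

-- ===== CLAIM (what is proved, stated in full; the proofs are below) =====
def Claim_equal_get_hex_sum : Prop := ∀ (arrays : List (List Int)), Dom_get_hex_sum arrays → Pre_get_hex_sum arrays → Spec_get_hex_sum arrays (get_hex_sum arrays)

-- ===== LEMMAS AND PROOFS =====

theorem pv_witness_ok :
    Dom_get_hex_sum pvWitness_get_hex_sum ∧ Pre_get_hex_sum pvWitness_get_hex_sum := by
  constructor <;> decide

-- A's inner loop over `arrays` at column j adds exactly the column sum
theorem pv_inner_fold (arrays : List (List Int)) (j : Nat) (c : Int) :
    arrays.foldl
      (fun s array =>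
        if (array.length : Int) > (j : Int) then s + (PySem.List.pyGet? array (j : Int)).getD 0 else s)
      c = c + pvColSum arrays j := by
  induction arrays generalizing c with
  | nil => simp [pvColSum]
  | cons a t ih =>
    have hstep : (if (a.length : Int) > (j : Int) then c + (PySem.List.pyGet? a (j : Int)).getD 0 else c)
        = c + a.getD j 0 := by
      by_cases h : (a.length : Int) > (j : Int)
      · have hj : j < a.length := by exact_mod_cast h
        simp [h, List.getD]
      · have hj : a.length ≤ j := by omega
        simp [h, List.getD, List.getElem?_eq_none hj]
    simp only [List.foldl_cons, hstep, ih]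
    simp [pvColSum]
    ring

-- value of the first n+1 columns
theorem pv_prefVal_succ (arrays : List (List Int)) (n : Nat) :
    pvPrefVal arrays (n + 1) = pvPrefVal arrays n + pvColSum arrays n * 16 ^ n := by
  simp [pvPrefVal, List.range_succ]

-- A's main loop invariant: digits so far (most significant first) and the carry
theorem pv_A_loop (arrays : List (List Int)) (L : Nat)
    (hS : ∀ k : Nat, k ≤ L → 0 ≤ pvPrefVal arrays k) (n : Nat) (hn : n ≤ L) :
    (PySem.List.pyRange 0 (n : Int) 1).foldl
      (fun (st : List Int × Int) i =>
        let sum_ := arrays.foldl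
          (fun s array =>
            if (array.length : Int) > i then s + (PySem.List.pyGet? array i).getD 0 else s)
          st.2
        if sum_ ≥ 16 then (PySem.Int.mod sum_ 16 :: st.1, PySem.Int.floordiv sum_ 16)
        else (sum_ :: st.1, 0))
      ([], 0)
    = (((List.range n).map (fun j => pvPrefVal arrays (j + 1) / 16 ^ j % 16)).reverse,
       pvPrefVal arrays n / 16 ^ n) := by
  induction n with
  | zero => simp [PySem.List.pyRange_one_eq_nil, pvPrefVal]
  | succ n ih =>
    have hn' : n ≤ L := by omega
    have hcast : ((n + 1 : Nat) : Int) = (n : Int) + 1 := by push_cast; ring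
    rw [hcast, PySem.List.pyRange_one_succ_right (by positivity), List.foldl_append, ih hn']
    simp only [List.foldl_cons, List.foldl_nil, pv_inner_fold]
    have hsum : pvPrefVal arrays n / 16 ^ n + pvColSum arrays n
        = pvPrefVal arrays (n + 1) / 16 ^ n := by
      rw [pv_prefVal_succ, Int.add_mul_ediv_right _ _ (by positivity : (16:Int) ^ n ≠ 0)]
    have h0 : 0 ≤ pvPrefVal arrays (n + 1) / 16 ^ n :=
      Int.ediv_nonneg (hS (n + 1) hn) (by positivity)
    rw [hsum]
    have hstep : ∀ (prev : List Int),
        (if pvPrefVal arrays (n + 1) / 16 ^ n ≥ 16 then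
          (PySem.Int.mod (pvPrefVal arrays (n + 1) / 16 ^ n) 16 :: prev,
           PySem.Int.floordiv (pvPrefVal arrays (n + 1) / 16 ^ n) 16)
         else (pvPrefVal arrays (n + 1) / 16 ^ n :: prev, 0))
        = (pvPrefVal arrays (n + 1) / 16 ^ n % 16 :: prev,
           pvPrefVal arrays (n + 1) / 16 ^ (n + 1)) := by
      intro prev
      have hdd : pvPrefVal arrays (n + 1) / 16 ^ n / 16 = pvPrefVal arrays (n + 1) / 16 ^ (n + 1) := by
        rw [Int.ediv_ediv_of_nonneg (by positivity), pow_succ]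
      by_cases hc : pvPrefVal arrays (n + 1) / 16 ^ n ≥ 16
      · rw [if_pos hc, PySem.Int.mod_eq_emod_of_pos (by norm_num),
          PySem.Int.floordiv_eq_ediv_of_pos (by norm_num), hdd]
      · rw [if_neg hc, Int.emod_eq_of_lt h0 (by omega), ← hdd,
          Int.ediv_eq_zero_of_lt h0 (by omega)]
    rw [hstep]
    rw [List.range_succ, List.map_append, List.reverse_append]
    rfl

-- B's extraction loop invariant
theorem pv_B_loop (T : Int) (n : Nat) :
    (PySem.List.pyRange 0 (n : Int) 1).foldl
      (fun (st : List String × Int) _ =>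
        (st.1 ++ [((PySem.Str.pyGet? pvHexStr (PySem.Int.mod st.2 16)).map (fun c => String.ofList [c])).getD ""],
         PySem.Int.floordiv st.2 16))
      ([], T)
    = ((List.range n).map
        (fun j => ((PySem.Str.pyGet? pvHexStr (T / 16 ^ j % 16)).map (fun c => String.ofList [c])).getD ""), T / 16 ^ n) := by
  induction n with
  | zero => simp [PySem.List.pyRange_one_eq_nil]
  | succ n ih =>
    have hcast : ((n + 1 : Nat) : Int) = (n : Int) + 1 := by push_cast; ring
    rw [hcast, PySem.List.pyRange_one_succ_right (by positivity), List.foldl_append, ih]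
    simp only [List.foldl_cons, List.foldl_nil]
    rw [PySem.Int.mod_eq_emod_of_pos (by norm_num), PySem.Int.floordiv_eq_ediv_of_pos (by norm_num)]
    rw [Int.ediv_ediv_of_nonneg (by positivity)]
    rw [List.range_succ, List.map_append]
    norm_num [pow_succ]

-- the value of one array's digits
def pvArrVal (a : List Int) (n : Nat) : Int :=
  ((List.range n).map (fun j => a.getD j 0 * 16 ^ j)).sum

theorem pv_arrVal_succ (a : List Int) (n : Nat) :
    pvArrVal a (n + 1) = pvArrVal a n + a.getD n 0 * 16 ^ n := by
  simp [pvArrVal, List.range_succ]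

theorem pv_arrVal_trunc (a : List Int) (n : Nat) (h : a.length ≤ n) :
    pvArrVal a n = pvArrVal a a.length := by
  induction n with
  | zero =>
    have h0 : a.length = 0 := by omega
    rw [h0]
  | succ n ih =>
    rcases Nat.lt_or_ge a.length (n + 1) with hlt | hge
    · have hn : a.length ≤ n := by omega
      have hd : a.getD n 0 = 0 := by
        simp [List.getD, List.getElem?_eq_none hn]
      rw [pv_arrVal_succ, hd, ih hn]
      ring
    · have : a.length = n + 1 := by omega
      rw [this]

theorem pv_prefVal_cons (a : List Int) (t : List (List Int)) (n : Nat) :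
    pvPrefVal (a :: t) n = pvArrVal a n + pvPrefVal t n := by
  induction n with
  | zero => simp [pvPrefVal, pvArrVal]
  | succ n ih =>
    rw [pv_prefVal_succ, ih, pv_prefVal_succ, pv_arrVal_succ]
    simp [pvColSum, add_mul]
    ring

-- one array's inner enumerate loop
theorem pv_enum_fold (a : List Int) (t : Int) :
    (PySem.List.enumerate a 0).foldl (fun t p => t + p.2 * 16 ^ p.1.toNat) t
      = t + pvArrVal a a.length := by
  rw [PySem.List.enumerate_eq_map_pyRange a 0, List.foldl_map,
    PySem.List.len_eq, PySem.List.pyRange_zero_natCast, List.foldl_map]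
  rw [PySem.List.foldl_congr_mem (List.range a.length) _
      (fun (acc : Int) (k : Nat) => acc + a.getD k 0 * 16 ^ k) t
      (by intro acc k _; rw [PySem.List.pyGetD_natCast, Int.toNat_natCast]),
    PySem.List.foldl_add (List.range a.length) (fun k => a.getD k 0 * 16 ^ k) t]
  rfl

-- B's accumulation computes the value of all L columns
theorem pv_B_total (arrays : List (List Int)) (L : Nat)
    (hL : ∀ a ∈ arrays, a.length ≤ L) : ∀ t : Int,
    arrays.foldl
      (fun t array => (PySem.List.enumerate array 0).foldl
        (fun t p => t + p.2 * 16 ^ p.1.toNat) t) t = t + pvPrefVal arrays L := by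
  induction arrays with
  | nil => intro t; simp [pvPrefVal, pvColSum]
  | cons a rest ih =>
    intro t
    have h1 := pv_prefVal_cons a rest L
    have h2 := pv_arrVal_trunc a L (hL a List.mem_cons_self)
    rw [List.foldl_cons, pv_enum_fold,
      ih (fun b hb => hL b (List.mem_cons_of_mem a hb)), h1, h2]
    ring

-- columns beyond j+1 do not change digit j
theorem pv_digit_align (S T : Int) (j : Nat) (h : (16 : Int) ^ (j + 1) ∣ T - S) :
    T / 16 ^ j % 16 = S / 16 ^ j % 16 := by
  obtain ⟨q, hq⟩ := h
  have hT : T = S + 16 * q * 16 ^ j := by rw [pow_succ] at hq; linarith [hq]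
  rw [hT, Int.add_mul_ediv_right _ _ (by positivity : (16:Int) ^ j ≠ 0), Int.add_mul_emod_self_left]

theorem pv_prefVal_dvd (arrays : List (List Int)) (j n : Nat) (h : j < n) :
    (16 : Int) ^ (j + 1) ∣ pvPrefVal arrays n - pvPrefVal arrays (j + 1) := by
  induction n with
  | zero => omega
  | succ n ih =>
    rcases Nat.lt_or_ge j n with hlt | hge
    · have h2 : pvPrefVal arrays (n + 1) - pvPrefVal arrays (j + 1)
          = (pvPrefVal arrays n - pvPrefVal arrays (j + 1)) + pvColSum arrays n * 16 ^ n := by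
        rw [pv_prefVal_succ]; ring
      rw [h2]
      exact dvd_add (ih hlt) (Dvd.dvd.mul_left (pow_dvd_pow 16 hlt) _)
    · have hj : j = n := by omega
      subst hj
      simp

-- A's dict scan equals indexing the hex string, on digits 0..15
theorem pv_hexmap_eq (d : Int) (h0 : 0 ≤ d) (h16 : d < 16) :
    (pvHexPairs.foldl (fun cur kv => if d == kv.2 then some kv.1 else cur) none).getD ""
      = ((PySem.Str.pyGet? pvHexStr d).map (fun c => String.ofList [c])).getD "" := by
  interval_cases d <;> decide

theorem pv_le_foldl_max_init (l : List Nat) (a : Nat) : a ≤ l.foldl max a := by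
  induction l generalizing a with
  | nil => exact le_refl _
  | cons b t ih => exact le_trans (le_max_left a b) (ih _)

theorem pv_mem_le_foldl_max (l : List Nat) : ∀ (a x : Nat), x ∈ l → x ≤ l.foldl max a := by
  induction l with
  | nil => intro a x hx; cases hx
  | cons b t ih =>
    intro a x hx
    rcases List.mem_cons.mp hx with rfl | hx
    · exact le_trans (le_max_right a x) (pv_le_foldl_max_init t _)
    · exact ih _ _ hx

-- ===== VERDICT (by name: the statement is the Claim_ definition above) =====
theorem get_hex_sum_spec : Claim_equal_get_hex_sum := by
  intro arrays _ hpre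
  obtain ⟨hne, hS⟩ := hpre
  unfold Spec_get_hex_sum get_hex_sum get_hex_sum_alt
  cases hmax : PySem.List.max? arrays (fun a => (a.length : Int)) with
  | none => exact absurd ((PySem.List.max?_eq_none_iff arrays _).mp hmax) hne
  | some m =>
    have hmem := PySem.List.max?_mem hmax
    have hmaxlen : ∀ a ∈ arrays, a.length ≤ m.length := by
      intro a ha
      have h := PySem.List.max?_isMax hmax a ha
      exact_mod_cast h
    have hLle : m.length ≤ (arrays.map List.length).foldl max 0 :=
      pv_mem_le_foldl_max _ 0 m.length (List.mem_map_of_mem hmem)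
    have hS' : ∀ k : Nat, k ≤ m.length → 0 ≤ pvPrefVal arrays k :=
      fun k hk => hS k (le_trans hk hLle)
    simp only [pv_A_loop arrays m.length hS' m.length (le_refl _),
      pv_B_total arrays m.length hmaxlen 0, pv_B_loop, List.map_reverse, List.map_map]
    congr 1
    apply List.map_congr_left
    intro j hj
    have hjL : j < m.length := List.mem_range.mp hj
    simp only [Function.comp_apply]
    have hd0 : 0 ≤ pvPrefVal arrays (j + 1) / 16 ^ j % 16 :=
      Int.emod_nonneg _ (by norm_num)
    have hd16 : pvPrefVal arrays (j + 1) / 16 ^ j % 16 < 16 :=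
      Int.emod_lt_of_pos _ (by norm_num)
    rw [pv_hexmap_eq _ hd0 hd16, zero_add,
      pv_digit_align (pvPrefVal arrays (j + 1)) (pvPrefVal arrays m.length) j
        (pv_prefVal_dvd arrays j m.length hjL)]
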